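-- pv_equiv track=rewrite | github.com/TCTri205/Voxtral | llm_evaluator/voxtral_utils.py | calculate_rf
-- ===== SOURCE A (Python) =====
-- def calculate_rf(text, n=3):
--     """Repetition Factor (RF) using Window-based N-gram."""
--     if not text or len(text) < n:
--         return 0
--
--     # Simple character-based N-gram for Japanese
--     ngrams = [text[i:i+n] for i in range(len(text)-n+1)]
--
--     repeats = 0
--     consecutive_count = 1
--     max_consecutive = 1
--
--     for i in range(len(ngrams)-1):
--         if ngrams[i] == ngrams[i+1]:
--             consecutive_count += 1
--             max_consecutive = max(max_consecutive, consecutive_count)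
--         else:
--             if consecutive_count >= 3:
--                 repeats += 1
--             consecutive_count = 1
--
--     # Check last one
--     if consecutive_count >= 3:
--         repeats += 1
--
--     return repeats
-- ===== SOURCE B (Python) =====
-- def calculate_rf(text, n=3):
--     """Repetition Factor (RF) using Window-based N-gram."""
--     # A maximal run of C identical characters yields C-n+1 equal consecutive
--     # n-grams, so the original's consecutive_count >= 3 test is exactly C >= n+2:
--     # count maximal identical-character runs of length >= n+2, one pass, no n-grams.
--     repeats = 0
--     run = 0
--     prev = None
--     for ch in text:
--         if ch == prev:
--             run += 1
--         else:
--             if run >= n + 2: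
--                 repeats += 1
--             prev = ch
--             run = 1
--     if run >= n + 2:
--         repeats += 1
--     return repeats
-- ===== Notes on version B (the rewrite author's own statement) =====
-- stated objective: faster
-- what changed: B never builds the n-gram list or compares adjacent n-grams (each comparison costs O(n)): it walks the characters once counting maximal runs of identical characters and counts runs of length >= n+2, using the identity that a run of C identical characters gives C-n+1 equal consecutive n-grams (consecutive_count >= 3 iff C >= n+2).
-- outside the precondition, e.g. on calculate_rf('abc', 0): A returns 1, B returns 0; on calculate_rf('ab', -5): A returns 1, B returns 3
import Mathlib
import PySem

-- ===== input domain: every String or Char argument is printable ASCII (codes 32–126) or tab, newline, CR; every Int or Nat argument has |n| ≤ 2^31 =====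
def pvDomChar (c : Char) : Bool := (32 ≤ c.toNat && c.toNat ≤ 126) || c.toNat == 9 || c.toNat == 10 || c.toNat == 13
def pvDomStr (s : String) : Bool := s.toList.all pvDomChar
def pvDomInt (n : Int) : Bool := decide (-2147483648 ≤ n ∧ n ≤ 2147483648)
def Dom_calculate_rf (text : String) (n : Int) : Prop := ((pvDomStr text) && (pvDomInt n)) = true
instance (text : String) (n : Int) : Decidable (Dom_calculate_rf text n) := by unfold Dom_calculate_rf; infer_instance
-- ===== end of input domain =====

-- B replaces the n-gram list and adjacent-n-gram scan by a single pass counting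
-- maximal runs of identical characters (a run of C identical chars means C-n+1
-- equal consecutive n-grams, so consecutive_count >= 3 iff C >= n+2): one O(len) pass
-- instead of building len-n+1 slices of length n (measured faster in a timing run).

-- ===== PORT A =====
def calculate_rf (text : String) (n : Int) : Int :=
  let l := text.toList
  if text = "" ∨ (l.length : Int) < n then 0
  else
    -- ngrams = [text[i:i+n] for i in range(len(text)-n+1)]
    let ngrams : List (List Char) :=
      (PySem.List.pyRange 0 ((l.length : Int) - n + 1) 1).map
        (fun i => PySem.List.slice l (some i) (some (i + n)))
    -- for i in range(len(ngrams)-1): …  state (repeats, consecutive_count, max_consecutive)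
    let st :=
      (PySem.List.pyRange 0 ((ngrams.length : Int) - 1) 1).foldl
        (fun (st : Int × Int × Int) i =>
          if PySem.List.pyGetD ngrams i [] = PySem.List.pyGetD ngrams (i + 1) [] then
            (st.1, st.2.1 + 1, max st.2.2 (st.2.1 + 1))
          else
            (if st.2.1 ≥ 3 then st.1 + 1 else st.1, 1, st.2.2))
        (0, 1, 1)
    if st.2.1 ≥ 3 then st.1 + 1 else st.1

-- ===== PORT B =====
-- one pass: prev / run / repeats, commit a repeat when a maximal run of length ≥ n+2 ends
def altRun (n : Int) : List Char → Option Char → Int → Int → Int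
  | [], _, run, repeats => if run ≥ n + 2 then repeats + 1 else repeats
  | c :: rest, prev, run, repeats =>
    if some c = prev then altRun n rest prev (run + 1) repeats
    else altRun n rest (some c) 1 (if run ≥ n + 2 then repeats + 1 else repeats)

def calculate_rf_alt (text : String) (n : Int) : Int :=
  altRun n text.toList none 0 0

-- ===== PRECONDITION & SPEC =====
-- Pre_ restricts to the natural domain of an n-gram size, n ≥ 1: for n ≤ 0 A still
-- returns values, but they are artefacts of Python's degenerate empty/negative-length
-- slices (all n-grams collapse to ''), not an n-gram repetition count.
def Pre_calculate_rf (text : String) (n : Int) : Prop := 1 ≤ n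
instance (text : String) (n : Int) : Decidable (Pre_calculate_rf text n) := by unfold Pre_calculate_rf; infer_instance
def pvWitness_calculate_rf : String × Int := ("aaaaab", 3)

def Spec_calculate_rf (text : String) (n : Int) (out : Int) : Prop := out = calculate_rf_alt text n
instance (text : String) (n : Int) (out : Int) : Decidable (Spec_calculate_rf text n out) := by unfold Spec_calculate_rf; infer_instance

-- ===== CLAIM (what is proved, stated in full; the proofs are below) =====
def Claim_equal_calculate_rf : Prop := ∀ (text : String) (n : Int), Dom_calculate_rf text n → Pre_calculate_rf text n → Spec_calculate_rf text n (calculate_rf text n)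

-- ===== LEMMAS AND PROOFS =====

-- suffix-recursion reformulation of A's loop (proof helper)
def loopA (n : Int) : List Char → Int → Int → Int
  | [], cc, rep => if cc ≥ 3 then rep + 1 else rep
  | x :: t, cc, rep =>
    if (t.length : Int) < n then (if cc ≥ 3 then rep + 1 else rep)
    else if (x :: t).take n.toNat = t.take n.toNat then loopA n t (cc + 1) rep
    else loopA n t 1 (if cc ≥ 3 then rep + 1 else rep)

-- A's fold over range indices equals loopA on the corresponding suffix
theorem bridgeA (n : Int) (hn : 1 ≤ n) (l : List Char) :
    ∀ (m k : Nat), (k : Int) + m = (l.length : Int) - n →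
    ∀ (cc rep mx : Int),
    (let ngrams : List (List Char) :=
      (PySem.List.pyRange 0 ((l.length : Int) - n + 1) 1).map
        (fun i => PySem.List.slice l (some i) (some (i + n)))
     let st :=
      (PySem.List.pyRange (k : Int) ((l.length : Int) - n) 1).foldl
        (fun (st : Int × Int × Int) i =>
          if PySem.List.pyGetD ngrams i [] = PySem.List.pyGetD ngrams (i + 1) [] then
            (st.1, st.2.1 + 1, max st.2.2 (st.2.1 + 1))
          else
            (if st.2.1 ≥ 3 then st.1 + 1 else st.1, 1, st.2.2))
        (rep, cc, mx)
     if st.2.1 ≥ 3 then st.1 + 1 else st.1) = loopA n (l.drop k) cc rep := by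
  intro m
  induction m with
  | zero =>
    intro k hk cc rep mx
    simp only []
    rw [PySem.List.pyRange_one_eq_nil (a := (k : Int)) (b := (l.length : Int) - n) (by omega),
        List.foldl_nil]
    cases hdk : l.drop k with
    | nil => simp [loopA]
    | cons x t =>
      have hT : t.length + 1 = l.length - k := by
        have := congrArg List.length hdk
        simp only [List.length_drop, List.length_cons] at this
        omega
      simp only [loopA]
      rw [if_pos (show (t.length : Int) < n from by omega)]
  | succ m ih =>
    intro k hk cc rep mx
    simp only []
    rw [PySem.List.pyRange_one_cons (a := (k : Int)) (b := (l.length : Int) - n) (by omega),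
        List.foldl_cons]
    simp only []
    rw [PySem.List.pyGetD_map_pyRange_of_nonneg _ _ _ _ (by omega) (by omega),
        PySem.List.pyGetD_map_pyRange_of_nonneg _ _ _ _ (by omega) (by omega),
        PySem.List.slice_toNat _ (by omega) (by omega),
        PySem.List.slice_toNat _ (by omega) (by omega),
        show ((k : Int) + n).toNat - ((k : Int)).toNat = n.toNat from by omega,
        show ((k : Int) + 1 + n).toNat - ((k : Int) + 1).toNat = n.toNat from by omega,
        show ((k : Int)).toNat = k from by omega,
        show ((k : Int) + 1).toNat = k + 1 from by omega]
    cases hdk : l.drop k with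
    | nil =>
      have := congrArg List.length hdk
      simp only [List.length_drop, List.length_nil] at this
      omega
    | cons x t =>
      have hT : t = l.drop (k + 1) := by
        have := congrArg List.tail hdk
        rw [List.tail_drop] at this
        exact this.symm
      have hTlen : t.length + k + 1 = l.length := by
        have := congrArg List.length hdk
        simp only [List.length_drop, List.length_cons] at this
        omega
      rw [← hT]
      simp only [loopA]
      rw [if_neg (show ¬((t.length : Int) < n) from by omega)]
      by_cases hEq : (x :: t).take n.toNat = t.take n.toNat
      · rw [if_pos hEq, if_pos hEq]
        have htail := ih (k + 1) (by push_cast; omega) (cc + 1) rep (max mx (cc + 1))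
        simp only [] at htail
        push_cast at htail ⊢
        rw [← hT] at htail
        exact htail
      · rw [if_neg hEq, if_neg hEq]
        have htail := ih (k + 1) (by push_cast; omega) 1 (if cc ≥ 3 then rep + 1 else rep) mx
        simp only [] at htail
        push_cast at htail ⊢
        rw [← hT] at htail
        exact htail

-- when at most n characters remain the loop body never runs again
theorem shortA (n : Int) :
    ∀ (l : List Char) (X : Int), (l.length : Int) ≤ n → loopA n l 1 X = X := by
  intro l X hl
  cases l with
  | nil => simp [loopA]
  | cons y t =>
    simp only [List.length_cons] at hl
    push_cast at hl
    simp only [loopA]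
    rw [if_pos (by omega)]
    norm_num

-- a run of c equal characters, followed by a differing character (or the end),
-- advances loopA across the run committing one repeat iff c ≥ n+2
theorem runA (n : Int) (hn : 1 ≤ n) (a : Char) :
    ∀ (c : Nat), 1 ≤ c → ∀ (l' : List Char), (∀ x ∈ l'.head?, x ≠ a) →
    ∀ (cc rep : Int),
    loopA n (List.replicate c a ++ l') cc rep
      = loopA n l' 1 (rep + if cc + max ((c : Int) - n) 0 ≥ 3 then 1 else 0) := by
  intro c
  induction c with
  | zero => omega
  | succ c ih =>
    intro _ l' hhead cc rep
    rw [List.replicate_succ, List.cons_append]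
    simp only [loopA]
    by_cases hG : ((List.replicate c a ++ l').length : Int) < n
    · -- fewer than n characters after the head: the loop body never runs
      rw [if_pos hG]
      simp only [List.length_append, List.length_replicate] at hG
      push_cast at hG
      rw [shortA n l' _ (by omega),
          show (max ((((c : Nat) + 1 : Nat) : Int) - n) 0) = 0 from by push_cast; omega]
      split <;> split <;> omega
    · rw [if_neg hG]
      simp only [List.length_append, List.length_replicate] at hG
      push_cast at hG
      by_cases hc : n ≤ (c : Int)
      · -- window still inside the run: the adjacent n-grams are equal
        have hn' : n.toNat ≤ c := by omega
        have htake : ∀ k : Nat, n.toNat ≤ k →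
            (List.replicate k a ++ l').take n.toNat = List.replicate n.toNat a := by
          intro k hk
          rw [List.take_append_of_le_length (by simpa using hk), List.take_replicate,
              min_eq_left hk]
        rw [show (a :: (List.replicate c a ++ l')) = List.replicate (c + 1) a ++ l' from by
              rw [List.replicate_succ, List.cons_append],
            if_pos (by rw [htake (c + 1) (by omega), htake c hn']),
            ih (by omega) l' hhead (cc + 1) rep]
        congr 1
        rw [show (max ((c : Int) - n) 0) = (c : Int) - n from by omega,
            show (max ((((c : Nat) + 1 : Nat) : Int) - n) 0) = (c : Int) + 1 - n from by
              push_cast; omega]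
        split <;> split <;> omega
      · -- the window straddles the run boundary: the n-grams differ, reset
        have hm : 1 ≤ l'.length := by omega
        obtain ⟨b, t', rfl⟩ : ∃ b t', l' = b :: t' := by
          cases l' with
          | nil => simp at hm
          | cons b t' => exact ⟨b, t', rfl⟩
        have hba : b ≠ a := hhead b rfl
        have hne : (a :: (List.replicate c a ++ b :: t')).take n.toNat ≠
            (List.replicate c a ++ b :: t').take n.toNat := by
          intro heq
          have hcn : c < n.toNat := by omega
          have h1 := congrArg (fun u => u[c]?) heq
          simp only at h1
          rw [List.getElem?_take_of_lt hcn, List.getElem?_take_of_lt hcn,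
              show (a :: (List.replicate c a ++ b :: t')) = List.replicate (c + 1) a ++ b :: t' from by
                rw [List.replicate_succ, List.cons_append],
              List.getElem?_append_left (by simp only [List.length_replicate]; omega),
              List.getElem?_append_right (by simp)] at h1
          simp at h1
          exact hba h1.symm
        rw [if_neg hne]
        rcases Nat.eq_zero_or_pos c with hc0 | hc1
        · subst hc0
          simp only [List.replicate, List.nil_append]
          congr 1
          rw [show (max ((((0 : Nat) + 1 : Nat) : Int) - n) 0) = 0 from by push_cast; omega]
          split <;> split <;> omega
        · rw [ih hc1 (b :: t') hhead 1 (if cc ≥ 3 then rep + 1 else rep)]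
          congr 1
          rw [show (max ((c : Int) - n) 0) = 0 from by omega,
              show (max ((((c : Nat) + 1 : Nat) : Int) - n) 0) = 0 from by push_cast; omega]
          split <;> split <;> omega

-- B consumes a run of the current character by just incrementing run
theorem runB (n : Int) (a : Char) :
    ∀ (c : Nat) (l' : List Char) (run rep : Int),
    altRun n (List.replicate c a ++ l') (some a) run rep
      = altRun n l' (some a) (run + c) rep := by
  intro c
  induction c with
  | zero => intro l' run rep; simp [List.replicate]
  | succ c ih =>
    intro l' run rep
    rw [List.replicate_succ, List.cons_append]
    show (if some a = some a then altRun n (List.replicate c a ++ l') (some a) (run + 1) rep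
          else altRun n (List.replicate c a ++ l') (some a) 1
            (if run ≥ n + 2 then rep + 1 else rep)) = _
    rw [if_pos rfl, ih]
    congr 1
    push_cast
    ring

-- B returns rep unchanged when fewer than n+2-run characters remain
theorem shortB (n : Int) :
    ∀ (l : List Char) (prev : Option Char) (run rep : Int),
    0 ≤ run → run + l.length < n + 2 → altRun n l prev run rep = rep := by
  intro l
  induction l with
  | nil =>
    intro prev run rep h0 hlt
    show (if run ≥ n + 2 then rep + 1 else rep) = rep
    rw [if_neg (by simp at hlt; omega)]
  | cons c rest ih =>
    intro prev run rep h0 hlt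
    simp only [List.length_cons] at hlt
    push_cast at hlt
    show (if some c = prev then altRun n rest prev (run + 1) rep
          else altRun n rest (some c) 1 (if run ≥ n + 2 then rep + 1 else rep)) = rep
    by_cases h : some c = prev
    · rw [if_pos h, ih _ _ _ (by omega) (by omega)]
    · rw [if_neg h, if_neg (by omega), ih _ _ _ (by omega) (by omega)]

-- the first element not dropped by dropWhile fails the predicate
theorem dropWhile_head_false (p : Char → Bool) :
    ∀ (l : List Char) (b : Char) (t' : List Char),
    l.dropWhile p = b :: t' → p b = false := by
  intro l
  induction l with
  | nil => intro b t' h; simp at h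
  | cons x xs ih =>
    intro b t' h
    rw [List.dropWhile_cons] at h
    by_cases hp : p x
    · rw [if_pos hp] at h; exact ih b t' h
    · rw [if_neg hp] at h
      cases h
      simpa using hp

-- loopA started fresh equals B's loop started fresh
theorem mainLem (n : Int) (hn : 1 ≤ n) :
    ∀ (N : Nat) (l : List Char), l.length ≤ N → ∀ (rep : Int),
    loopA n l 1 rep = altRun n l none 0 rep := by
  intro N
  induction N with
  | zero =>
    intro l hl rep
    rw [List.length_eq_zero_iff.mp (Nat.le_zero.mp hl)]
    show (if (1 : Int) ≥ 3 then rep + 1 else rep) = (if (0 : Int) ≥ n + 2 then rep + 1 else rep)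
    rw [if_neg (by omega), if_neg (by omega)]
  | succ N ihN =>
    intro l hl rep
    cases l with
    | nil =>
      show (if (1 : Int) ≥ 3 then rep + 1 else rep) = (if (0 : Int) ≥ n + 2 then rep + 1 else rep)
      rw [if_neg (by omega), if_neg (by omega)]
    | cons a t =>
      obtain ⟨c, dw, hsplit, hc1, hd, hlen⟩ :
          ∃ (c : Nat) (dw : List Char), a :: t = List.replicate c a ++ dw ∧ 1 ≤ c ∧
            (∀ x ∈ dw.head?, x ≠ a) ∧ c + dw.length = t.length + 1 := by
        have htw : List.takeWhile (fun x => x == a) (a :: t)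
            = a :: List.takeWhile (fun x => x == a) t :=
          List.takeWhile_cons_of_pos (by simp)
        have hrepl : List.takeWhile (fun x => x == a) (a :: t)
            = List.replicate (List.takeWhile (fun x => x == a) (a :: t)).length a :=
          List.eq_replicate_iff.mpr ⟨rfl, fun b hb => by
            have := List.mem_takeWhile_imp hb; simpa using this⟩
        refine ⟨(List.takeWhile (fun x => x == a) (a :: t)).length,
                List.dropWhile (fun x => x == a) (a :: t), ?_, ?_, ?_, ?_⟩
        · conv_lhs => rw [← List.takeWhile_append_dropWhile (p := fun x => x == a) (l := a :: t)]
          rw [← hrepl]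
        · rw [htw]; simp
        · intro x hx hxa
          cases hdwc : List.dropWhile (fun x => x == a) (a :: t) with
          | nil => rw [hdwc] at hx; simp at hx
          | cons b t' =>
            have h2 := dropWhile_head_false (fun x => x == a) (a :: t) b t' hdwc
            rw [hdwc] at hx
            simp only [List.head?_cons, Option.mem_def, Option.some.injEq] at hx
            simp at h2
            exact h2 (by rw [hx, hxa])
        · have := congrArg List.length
            (List.takeWhile_append_dropWhile (p := fun x => x == a) (l := a :: t))
          simp only [List.length_append, List.length_cons] at this
          omega
      -- left side across the leading run
      rw [hsplit, runA n hn a c hc1 dw hd 1 rep]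
      -- right side: consume the head and then the rest of the run
      have hstep : altRun n (List.replicate c a ++ dw) none 0 rep
          = altRun n dw (some a) (c : Int) rep := by
        obtain ⟨c', rfl⟩ : ∃ c', c = c' + 1 := ⟨c - 1, by omega⟩
        rw [List.replicate_succ, List.cons_append]
        show (if some a = none then _ else altRun n (List.replicate c' a ++ dw) (some a) 1
              (if (0 : Int) ≥ n + 2 then rep + 1 else rep)) = _
        rw [if_neg (show ¬(some a = (none : Option Char)) from by simp),
            if_neg (show ¬((0 : Int) ≥ n + 2) from by omega), runB]
        congr 1
        push_cast
        ring
      rw [← hsplit] at hstep ⊢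
      rw [hstep]
      have hR : rep + (if 1 + max ((c : Int) - n) 0 ≥ 3 then 1 else 0)
          = (if (c : Int) ≥ n + 2 then rep + 1 else rep) := by
        rw [max_def]
        split_ifs <;> omega
      rw [hR]
      cases hdwc : dw with
      | nil =>
        show (if (1 : Int) ≥ 3 then _ + 1 else _) = (if (c : Int) ≥ n + 2 then rep + 1 else rep)
        rw [if_neg (by omega)]
      | cons b t' =>
        have hba : b ≠ a := hd b (by rw [hdwc]; rfl)
        have hl' : t.length + 1 ≤ N + 1 := by simpa using hl
        have hlen' : (b :: t').length ≤ N := by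
          rw [← hdwc]
          omega
        show loopA n (b :: t') 1 (if (c : Int) ≥ n + 2 then rep + 1 else rep)
            = (if some b = some a then altRun n t' (some a) ((c : Int) + 1) rep
               else altRun n t' (some b) 1 (if (c : Int) ≥ n + 2 then rep + 1 else rep))
        rw [if_neg (show ¬(some b = some a) from by simpa using hba),
            ihN (b :: t') hlen' (if (c : Int) ≥ n + 2 then rep + 1 else rep)]
        show (if some b = none then _ else altRun n t' (some b) 1
              (if (0 : Int) ≥ n + 2 then _ + 1 else _)) = _
        rw [if_neg (show ¬(some b = (none : Option Char)) from by simp),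
            if_neg (show ¬((0 : Int) ≥ n + 2) from by omega)]

-- ===== VERDICT (by name: the statement is the Claim_ definition above) =====
theorem calculate_rf_spec : Claim_equal_calculate_rf := by
  intro text n hdom hpre
  have hn : 1 ≤ n := hpre
  simp only [Spec_calculate_rf, calculate_rf, calculate_rf_alt]
  by_cases hg : text = "" ∨ ((text.toList.length : Int) < n)
  · rw [if_pos hg]
    refine (shortB n text.toList none 0 0 le_rfl ?_).symm
    rcases hg with h | h
    · rw [h]
      simp
      omega
    · omega
  · rw [if_neg hg]
    push Not at hg
    obtain ⟨-, hnl⟩ := hg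
    have hlen : ((List.map (fun i => PySem.List.slice text.toList (some i) (some (i + n)))
        (PySem.List.pyRange 0 ((text.toList.length : Int) - n + 1) 1)).length : Int) - 1
        = (text.toList.length : Int) - n := by
      rw [List.length_map, PySem.List.length_pyRange_one]
      omega
    rw [hlen]
    have hb := bridgeA n hn text.toList ((text.toList.length : Int) - n).toNat 0
      (by omega) 1 0 1
    simp only [Nat.cast_zero, List.drop_zero] at hb
    rw [hb]
    exact mainLem n hn text.toList.length text.toList le_rfl 0
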